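-- pv_equiv track=rewrite | github.com/klimarichard/nprg045 | src/rikli/file.py | parse_filenames
-- ===== SOURCE A (Python) =====
-- def parse_filenames(ids: list[str]) -> list[str]:
--     """
--     Gets list of filenames from list of sentence IDs.
--     :param ids: list of sentence IDs
--     :return: list of filenames
--     """
--     filenames = []
--     old_filename = ''
--
--     for sentence_id in ids:
--         parsed_id = sentence_id.split('-')
--         new_filename = parsed_id[0] + '_' + parsed_id[1]
--
--         if new_filename != old_filename:
--             old_filename = new_filename
--
--             filenames.append(new_filename)
--
--     return filenames
-- ===== SOURCE B (Python) =====
-- def parse_filenames(ids: list[str]) -> list[str]: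
--     """
--     Gets list of filenames from list of sentence IDs.
--     Run-extraction version: for each maximal run of consecutive IDs mapping
--     to the same filename, emit that filename once, then jump to the start
--     of the next run (a hand-rolled itertools.groupby over the key).
--     """
--     def filename(sid):
--         parts = sid.split('-')
--         return parts[0] + '_' + parts[1]
--
--     filenames = []
--     i, n = 0, len(ids)
--     while i < n:
--         key = filename(ids[i])
--         filenames.append(key)
--         j = i + 1
--         while j < n and filename(ids[j]) == key:
--             j += 1
--         i = j
--     return filenames
-- ===== Notes on version B (the rewrite author's own statement) =====
-- stated objective: alternative
-- what changed: Replaces the element-by-element sentinel loop (compare each filename with the previously kept one) by run extraction: an outer loop that emits one representative filename per maximal run of consecutive equal-filename IDs and an inner loop that skips to the start of the next run, i.e. a hand-rolled itertools.groupby.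
import Mathlib
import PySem

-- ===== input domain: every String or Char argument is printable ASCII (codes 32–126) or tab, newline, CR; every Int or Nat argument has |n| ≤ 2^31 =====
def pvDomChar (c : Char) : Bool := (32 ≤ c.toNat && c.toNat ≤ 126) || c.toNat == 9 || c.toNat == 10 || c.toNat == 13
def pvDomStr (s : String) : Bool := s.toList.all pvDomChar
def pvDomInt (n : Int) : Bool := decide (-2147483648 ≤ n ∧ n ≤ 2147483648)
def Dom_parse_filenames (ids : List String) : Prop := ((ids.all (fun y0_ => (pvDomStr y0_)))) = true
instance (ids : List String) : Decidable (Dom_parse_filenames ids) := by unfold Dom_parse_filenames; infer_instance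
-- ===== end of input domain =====

-- B replaces A's sentinel loop by run extraction (emit one filename per maximal run of
-- consecutive equal-filename IDs, then skip to the next run); same cost, different decomposition.

-- ===== PORT A =====
-- parsed_id[0] + '_' + parsed_id[1] (pyGet? 1 is some on every input admitted by Pre_; getD inert there)
def pvName (sid : String) : String :=
  let parsed := (PySem.Str.split? sid "-").getD []  -- sep "-" ≠ "": split? is some
  ((PySem.List.pyGet? parsed 0).getD "") ++ "_" ++ ((PySem.List.pyGet? parsed 1).getD "")

-- the for-loop over the state (filenames, old_filename)
def parse_filenames (ids : List String) : List String :=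
  (ids.foldl
    (fun (st : List String × String) sentence_id =>
      let new_filename := pvName sentence_id
      if new_filename ≠ st.2 then (st.1 ++ [new_filename], new_filename) else st)
    ([], "")).1

-- ===== PORT B =====
-- the inner while loop: advance past the elements whose filename equals key
def pvSkipRun (key : String) : List String → List String
  | [] => []
  | x :: xs => if pvName x = key then pvSkipRun key xs else x :: xs

theorem pvSkipRun_len_le (key : String) (l : List String) :
    (pvSkipRun key l).length ≤ l.length := by
  induction l with
  | nil => simp [pvSkipRun]
  | cons x xs ih =>
      simp only [pvSkipRun]
      split
      · exact Nat.le_trans ih (Nat.le_succ _)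
      · exact Nat.le_refl _

-- the outer while loop: emit one key per run, continue after the run
def parse_filenames_alt (ids : List String) : List String :=
  match ids with
  | [] => []
  | sid :: rest =>
      let key := pvName sid
      key :: parse_filenames_alt (pvSkipRun key rest)
termination_by ids.length
decreasing_by
  exact Nat.lt_succ_of_le (pvSkipRun_len_le _ _)

-- ===== PRECONDITION & SPEC =====
-- Pre_ excludes exactly the IDs without '-': there parsed_id[1] raises IndexError in A (and B raises identically).
def Pre_parse_filenames (ids : List String) : Prop :=
  ∀ sid ∈ ids, 2 ≤ ((PySem.Str.split? sid "-").getD []).length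

instance (ids : List String) : Decidable (Pre_parse_filenames ids) := by
  unfold Pre_parse_filenames; infer_instance

def pvWitness_parse_filenames : List String := ["ln94200-1-p1s1", "ln94200-1-p1s2", "ln94200-2-p1s1"]

def Spec_parse_filenames (ids : List String) (out : List String) : Prop := out = parse_filenames_alt ids
instance (ids : List String) (out : List String) : Decidable (Spec_parse_filenames ids out) := by unfold Spec_parse_filenames; infer_instance

-- ===== CLAIM (what is proved, stated in full; the proofs are below) =====
def Claim_equal_parse_filenames : Prop := ∀ (ids : List String), Dom_parse_filenames ids → Pre_parse_filenames ids → Spec_parse_filenames ids (parse_filenames ids)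

-- ===== LEMMAS AND PROOFS =====

-- A's loop, written as structural recursion on the remaining ids
def pvAux : List String → String → List String
  | [], _ => []
  | sid :: rest, old =>
      let nf := pvName sid
      if nf ≠ old then nf :: pvAux rest nf else pvAux rest old

theorem pvFoldl_eq_aux (ids : List String) (acc : List String) (old : String) :
    (ids.foldl
      (fun (st : List String × String) sentence_id =>
        let new_filename := pvName sentence_id
        if new_filename ≠ st.2 then (st.1 ++ [new_filename], new_filename) else st)
      (acc, old)).1 = acc ++ pvAux ids old := by
  induction ids generalizing acc old with
  | nil => simp [pvAux]
  | cons sid rest ih =>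
      rw [List.foldl_cons]
      show (List.foldl _
          (if pvName sid ≠ old then (acc ++ [pvName sid], pvName sid) else (acc, old)) rest).1
        = acc ++ pvAux (sid :: rest) old
      by_cases h : pvName sid = old
      · rw [if_neg (by simp [h]), ih, pvAux]
        simp [h]
      · rw [if_pos h, ih, pvAux]
        simp [h]

-- A's sentinel recursion equals B's run recursion, once the current run of 'old' is skipped
theorem pvAux_eq_runs (l : List String) (old : String) :
    pvAux l old = parse_filenames_alt (pvSkipRun old l) := by
  induction l generalizing old with
  | nil => simp [pvAux, pvSkipRun, parse_filenames_alt]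
  | cons x xs ih =>
      simp only [pvAux, pvSkipRun]
      by_cases h : pvName x = old
      · simp only [h, ne_eq, not_true_eq_false, if_false]
        exact ih old
      · simp only [ne_eq, h, not_false_eq_true, if_true]
        rw [parse_filenames_alt.eq_def]
        exact congrArg _ (ih (pvName x))

theorem pvName_ne_empty (sid : String) : pvName sid ≠ "" := by
  intro h
  have h2 : (pvName sid).toList = [] := by rw [h]; rfl
  simp only [pvName, String.toList_append] at h2
  rcases List.append_eq_nil_iff.mp h2 with ⟨h3, -⟩
  rcases List.append_eq_nil_iff.mp h3 with ⟨-, h5⟩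
  exact absurd h5 (by decide)

theorem pvSkipRun_empty (l : List String) : pvSkipRun "" l = l := by
  cases l with
  | nil => rfl
  | cons x xs => simp [pvSkipRun, pvName_ne_empty x]

-- ===== VERDICT (by name: the statement is the Claim_ definition above) =====
theorem parse_filenames_spec : Claim_equal_parse_filenames := by
  intro ids _ _
  unfold Spec_parse_filenames parse_filenames
  rw [pvFoldl_eq_aux, List.nil_append, pvAux_eq_runs, pvSkipRun_empty]
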